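-- pv_equiv track=rewrite | github.com/deepaucksharma/nrdot-lab | scripts/visualize.py | get_optimal_otel
-- ===== SOURCE A (Python) =====
-- def get_optimal_otel(otel_intervals):
--     """Determine the optimal OpenTelemetry interval"""
--     if not otel_intervals:
--         return "10s"  # Default recommendation
--
--     # Predefined preferences based on typical tradeoffs
--     preferences = ['10s', '5s', '20s', 'Docker']
--
--     for pref in preferences:
--         if pref in otel_intervals:
--             return pref
--
--     # If no preferred interval found, return any available one
--     if otel_intervals:
--         return list(otel_intervals.keys())[0]
--
--     return "10s"  # Default fallback
-- ===== SOURCE B (Python) =====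
-- def get_optimal_otel(otel_intervals):
--     """Determine the optimal OpenTelemetry interval"""
--     if not otel_intervals:
--         return "10s"  # Default recommendation
--     # Rank table: position in the preference order; unknown keys rank last (4)
--     rank = {'10s': 0, '5s': 1, '20s': 2, 'Docker': 3}
--     # Single pass over the available keys; min keeps the first minimal key,
--     # which reproduces "first preferred, else first key".
--     return min(otel_intervals, key=lambda k: rank.get(k, 4))
-- ===== Notes on version B (the rewrite author's own statement) =====
-- stated objective: alternative
-- what changed: Replaces the scan over the preference list with membership tests by a rank table and a single keyed min over the available keys (first-minimum tie-breaking gives the same 'first preferred, else first key' result).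
import Mathlib
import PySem

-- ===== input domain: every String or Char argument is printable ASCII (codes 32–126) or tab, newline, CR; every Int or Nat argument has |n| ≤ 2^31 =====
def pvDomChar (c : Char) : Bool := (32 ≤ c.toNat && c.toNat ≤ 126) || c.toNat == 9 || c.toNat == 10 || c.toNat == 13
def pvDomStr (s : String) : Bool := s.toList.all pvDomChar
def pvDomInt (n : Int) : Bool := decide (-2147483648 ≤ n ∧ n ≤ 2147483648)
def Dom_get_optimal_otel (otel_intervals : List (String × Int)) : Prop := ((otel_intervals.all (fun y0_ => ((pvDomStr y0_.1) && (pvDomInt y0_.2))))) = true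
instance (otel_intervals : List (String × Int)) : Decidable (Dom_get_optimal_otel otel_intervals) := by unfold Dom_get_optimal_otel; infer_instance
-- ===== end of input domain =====

-- ===== PORT A =====
-- B replaces the preference-list scan by a rank table and one keyed min over the keys (objective: alternative).
def get_optimal_otel (otel_intervals : List (String × Int)) : String :=
  if otel_intervals.isEmpty then "10s"  -- Default recommendation
  else
    -- for pref in preferences: if pref in otel_intervals: return pref
    match (["10s", "5s", "20s", "Docker"]).find?
        (fun p => (PySem.Dict.keys ⟨otel_intervals⟩).contains p) with
    | some p => p
    | none =>
      -- if otel_intervals: return list(otel_intervals.keys())[0]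
      if otel_intervals.isEmpty then "10s"
      else (PySem.Dict.keys ⟨otel_intervals⟩).headD "10s"

-- ===== PORT B =====
def pvRankTbl : PySem.Dict String Int := ⟨[("10s", 0), ("5s", 1), ("20s", 2), ("Docker", 3)]⟩

-- the key function `lambda k: rank.get(k, 4)`
def pvRank (k : String) : Int := PySem.Dict.getD pvRankTbl k 4

def get_optimal_otel_alt (otel_intervals : List (String × Int)) : String :=
  if otel_intervals.isEmpty then "10s"
  else
    -- min(otel_intervals, key=lambda k: rank.get(k, 4)); the list is nonempty here,
    -- so minD's default is never used (Python's min takes no default in Source B).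
    PySem.List.minD (PySem.Dict.keys ⟨otel_intervals⟩) pvRank "10s"



-- ===== PRECONDITION & SPEC =====
def Spec_get_optimal_otel (otel_intervals : List (String × Int)) (out : String) : Prop := out = get_optimal_otel_alt otel_intervals
instance (otel_intervals : List (String × Int)) (out : String) : Decidable (Spec_get_optimal_otel otel_intervals out) := by unfold Spec_get_optimal_otel; infer_instance

-- ===== CLAIM (what is proved, stated in full; the proofs are below) =====
def Claim_equal_get_optimal_otel : Prop := ∀ (otel_intervals : List (String × Int)), Dom_get_optimal_otel otel_intervals → Spec_get_optimal_otel otel_intervals (get_optimal_otel otel_intervals)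

-- ===== LEMMAS AND PROOFS =====
theorem pvRank_eval (k : String) :
    pvRank k = if k = "10s" then 0 else if k = "5s" then 1 else if k = "20s" then 2
      else if k = "Docker" then 3 else 4 := by
  by_cases h1 : k = "10s"
  · subst h1; decide
  by_cases h2 : k = "5s"
  · subst h2; decide
  by_cases h3 : k = "20s"
  · subst h3; decide
  by_cases h4 : k = "Docker"
  · subst h4; decide
  have e1 : (("10s" : String) == k) = false := beq_eq_false_iff_ne.mpr (fun h => h1 h.symm)
  have e2 : (("5s" : String) == k) = false := beq_eq_false_iff_ne.mpr (fun h => h2 h.symm)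
  have e3 : (("20s" : String) == k) = false := beq_eq_false_iff_ne.mpr (fun h => h3 h.symm)
  have e4 : (("Docker" : String) == k) = false := beq_eq_false_iff_ne.mpr (fun h => h4 h.symm)
  simp [pvRank, pvRankTbl, PySem.Dict.getD, PySem.Dict.get?, List.find?, e1, e2, e3, e4, h1, h2, h3, h4]
def pvSel (k : String) (ks : List String) : String :=
  if "10s" ∈ k :: ks then "10s"
  else if "5s" ∈ k :: ks then "5s"
  else if "20s" ∈ k :: ks then "20s"
  else if "Docker" ∈ k :: ks then "Docker"
  else k
theorem pvSel_cons (k x : String) (tl : List String) :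
    pvSel (if pvRank x < pvRank k then x else k) tl = pvSel k (x :: tl) := by
  by_cases h1 : k = "10s" <;> by_cases h2 : k = "5s" <;> by_cases h3 : k = "20s" <;>
    by_cases h4 : k = "Docker" <;> by_cases g1 : x = "10s" <;> by_cases g2 : x = "5s" <;>
    by_cases g3 : x = "20s" <;> by_cases g4 : x = "Docker" <;>
    simp_all [pvSel, pvRank_eval, List.mem_cons, eq_comm]
theorem pvFold_eq (tl : List String) (k : String) :
    tl.foldl (fun m y => if pvRank y < pvRank m then y else m) k = pvSel k tl := by
  induction tl generalizing k with
  | nil => simp only [pvSel, List.not_mem_nil, List.mem_cons, or_false]; split_ifs <;> simp_all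
  | cons x tl ih => rw [List.foldl_cons, ih, pvSel_cons]
theorem pvFindA (k : String) (tl : List String) :
    (match (["10s", "5s", "20s", "Docker"]).find? (fun p => (k :: tl).contains p) with
      | some p => p
      | none => (k :: tl).headD "10s") = pvSel k tl := by
  simp only [List.find?, List.contains_eq_mem]
  by_cases c1 : "10s" ∈ k :: tl <;> by_cases c2 : "5s" ∈ k :: tl <;>
    by_cases c3 : "20s" ∈ k :: tl <;> by_cases c4 : "Docker" ∈ k :: tl <;>
    simp_all [pvSel, List.headD]

theorem pvMin?_cons (k : String) (tl : List String) :
    PySem.List.min? (k :: tl) pvRank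
      = some (tl.foldl (fun m y => if pvRank y < pvRank m then y else m) k) := by
  simp only [PySem.List.min?, List.foldl_cons]
  induction tl generalizing k with
  | nil => rfl
  | cons x tl ih => simp only [List.foldl_cons]; split <;> exact ih _

-- ===== VERDICT (by name: the statement is the Claim_ definition above) =====
theorem get_optimal_otel_spec : Claim_equal_get_optimal_otel := by
  intro d _
  show get_optimal_otel d = get_optimal_otel_alt d
  unfold get_optimal_otel get_optimal_otel_alt
  cases d with
  | nil => rfl
  | cons p rest =>
    simp only [List.isEmpty_cons, Bool.false_eq_true, if_false]
    rw [show PySem.Dict.keys (⟨p :: rest⟩ : PySem.Dict String Int)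
          = p.1 :: rest.map Prod.fst from rfl]
    rw [PySem.List.minD, pvMin?_cons, Option.getD_some, pvFold_eq, pvFindA]
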